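-- pv_equiv track=rewrite | github.com/Nina932/NYXFINCORE | backend/app/services/file_parser.py | _build_parent_codes
-- ===== SOURCE A (Python) =====
-- def _build_parent_codes(tb_items: list) -> set:
--     """Build set of ALL ancestor codes from TB items for leaf detection.
--     For code '8220.01.1/1', generates parents: '8220', '8220.01', '8220.01.1'.
--     This prevents double-counting when both parent totals and child details exist.
--     """
--     parent_codes = set()
--     for item in tb_items:
--         code = item.get('account_code', '')
--         # Generate ALL ancestor prefixes by finding each separator
--         for i, ch in enumerate(code):
--             if ch in ('.', '/'):
--                 parent_codes.add(code[:i])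
--     return parent_codes
-- ===== SOURCE B (Python) =====
-- def _build_parent_codes(tb_items: list) -> set:
--     """Build set of ALL ancestor codes from TB items for leaf detection.
--
--     Tokenizing strategy: split each code into separator-free segments and
--     slice the original code at the cumulative segment boundaries.
--     """
--     parent_codes = set()
--     for item in tb_items:
--         code = item.get('account_code', '')
--         segs = code.replace('/', '.').split('.')
--         n = 0
--         for seg in segs[:-1]:
--             n += len(seg)
--             parent_codes.add(code[:n])
--             n += 1
--     return parent_codes
-- ===== Notes on version B (the rewrite author's own statement) =====
-- stated objective: idiomatic
-- what changed: Replaces the char-by-char enumerate scan with a tokenizing pass: normalize '/' to '.', split into segments, and add a prefix of the original code at each cumulative segment boundary.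
import Mathlib
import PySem

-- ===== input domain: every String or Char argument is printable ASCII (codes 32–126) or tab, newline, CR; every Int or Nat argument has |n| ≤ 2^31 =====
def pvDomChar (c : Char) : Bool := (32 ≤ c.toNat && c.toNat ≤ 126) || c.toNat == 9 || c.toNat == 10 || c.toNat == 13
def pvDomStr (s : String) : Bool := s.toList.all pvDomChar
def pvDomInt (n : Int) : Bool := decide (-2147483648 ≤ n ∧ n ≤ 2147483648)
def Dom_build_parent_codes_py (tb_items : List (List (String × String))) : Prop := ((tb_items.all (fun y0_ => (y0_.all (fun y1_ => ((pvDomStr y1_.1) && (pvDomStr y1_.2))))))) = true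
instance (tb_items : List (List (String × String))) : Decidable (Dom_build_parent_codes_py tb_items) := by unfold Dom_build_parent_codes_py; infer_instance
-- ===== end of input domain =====

-- B replaces A's char-by-char enumerate scan by a tokenizing pass (normalize '/' to '.', split into
-- segments, slice the original code at cumulative segment boundaries); objective: idiomatic, same cost.

-- ===== PORT A =====
def build_parent_codes_py (tb_items : List (List (String × String))) : List String :=
  tb_items.foldl
    (fun parent_codes item =>
      let code := PySem.Dict.getD ⟨item⟩ "account_code" ""
      (PySem.List.enumerate code.toList).foldl
        (fun parent_codes p =>
          if p.2 = '.' ∨ p.2 = '/' then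
            PySem.Set.add parent_codes (PySem.Str.slice code none (some p.1))
          else parent_codes)
        parent_codes)
    (PySem.Set.empty : PySem.Set String)

-- ===== PORT B =====
def build_parent_codes_py_alt (tb_items : List (List (String × String))) : List String :=
  tb_items.foldl
    (fun parent_codes item =>
      let code := PySem.Dict.getD ⟨item⟩ "account_code" ""
      let segs := PySem.Chars.splitOn (PySem.Str.replace code "/" ".").toList ['.']
      ((PySem.List.slice segs none (some (-1))).foldl
        (fun (st : PySem.Set String × Int) seg =>
          let n := st.2 + (seg.length : Int)
          (PySem.Set.add st.1 (PySem.Str.slice code none (some n)), n + 1))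
        (parent_codes, 0)).1)
    (PySem.Set.empty : PySem.Set String)

-- ===== PRECONDITION & SPEC =====
def Spec_build_parent_codes_py (tb_items : List (List (String × String))) (out : List String) : Prop := out = build_parent_codes_py_alt tb_items
instance (tb_items : List (List (String × String))) (out : List String) : Decidable (Spec_build_parent_codes_py tb_items out) := by unfold Spec_build_parent_codes_py; infer_instance

-- ===== CLAIM (what is proved, stated in full; the proofs are below) =====
def Claim_equal_build_parent_codes_py : Prop := ∀ (tb_items : List (List (String × String))), Dom_build_parent_codes_py tb_items → Spec_build_parent_codes_py tb_items (build_parent_codes_py tb_items)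

-- ===== LEMMAS AND PROOFS =====

/-- '/'→'.' normalization of one character. -/
def pvNorm (c : Char) : Char := if c = '/' then '.' else c

/-- Splitting a char list on '.' (reference form of `Chars.splitOn · ['.']`). -/
def pvSplit : List Char → List (List Char)
  | [] => [[]]
  | c :: t =>
    if c = '.' then [] :: pvSplit t
    else
      match pvSplit t with
      | s :: r => (c :: s) :: r
      | [] => [[c]]

/-- B's loop body, named (definitionally equal to the lambda in the port of B). -/
def pvStepB (code : String) (st : PySem.Set String × Int) (seg : List Char) :
    PySem.Set String × Int :=
  let n := st.2 + (seg.length : Int)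
  (PySem.Set.add st.1 (PySem.Str.slice code none (some n)), n + 1)

/-- Common reference loop: walk the remaining chars at absolute position `d`,
adding `code[:d]` at each separator. -/
def pvP (code : String) : List Char → Int → PySem.Set String → PySem.Set String
  | [], _, pc => pc
  | c :: t, d, pc =>
    pvP code t (d + 1)
      (if c = '.' ∨ c = '/' then PySem.Set.add pc (PySem.Str.slice code none (some d)) else pc)

theorem pvSplit_ne_nil (cs : List Char) : pvSplit cs ≠ [] := by
  cases cs with
  | nil => simp [pvSplit]
  | cons c t =>
    simp only [pvSplit]
    split
    · simp
    · cases h : pvSplit t <;> simp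

theorem pvReplace_go (l : List Char) (fuel : ℕ) (acc : List Char) (h : l.length ≤ fuel) :
    PySem.Chars.replace.go ['/'] ['.'] fuel l acc = acc.reverse ++ l.map pvNorm := by
  induction l generalizing fuel acc with
  | nil =>
    cases fuel <;> simp [PySem.Chars.replace.go]
  | cons c t ih =>
    cases fuel with
    | zero => simp at h
    | succ f =>
      rw [PySem.Chars.replace.go]
      by_cases hc : c = '/'
      · subst hc
        have hpre : List.isPrefixOf ['/'] ('/' :: t) = true := by simp [List.isPrefixOf]
        simp only [hpre, if_pos, List.length_cons, List.length_nil, List.drop_succ_cons,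
          List.drop_zero]
        rw [ih f _ (by simpa using Nat.le_of_succ_le_succ h)]
        simp [pvNorm]
      · have hpre : List.isPrefixOf ['/'] (c :: t) = false := by
          simp [List.isPrefixOf]
          exact fun hh => hc hh.symm
        simp only [hpre, Bool.false_eq_true, if_false]
        rw [ih f _ (by simpa using Nat.le_of_succ_le_succ h)]
        simp [pvNorm, hc]

theorem pvReplace_eq (code : String) :
    (PySem.Str.replace code "/" ".").toList = code.toList.map pvNorm := by
  rw [PySem.Str.toList_replace]
  show PySem.Chars.replace code.toList ['/'] ['.'] = _
  rw [PySem.Chars.replace]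
  simp only [List.isEmpty_cons, Bool.false_eq_true, if_false]
  exact pvReplace_go _ _ _ le_rfl

theorem pvSplitOn_go (l : List Char) (fuel : ℕ) (cur : List Char) (acc : List (List Char))
    (h : l.length ≤ fuel) :
    PySem.Chars.splitOn.go ['.'] fuel l cur acc =
      acc.reverse ++ (match pvSplit l with
        | s :: r => (cur.reverse ++ s) :: r
        | [] => []) := by
  induction l generalizing fuel cur acc with
  | nil =>
    cases fuel <;> simp [PySem.Chars.splitOn.go, pvSplit]
  | cons c t ih =>
    cases fuel with
    | zero => simp at h
    | succ f =>
      rw [PySem.Chars.splitOn.go]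
      by_cases hc : c = '.'
      · subst hc
        have hpre : List.isPrefixOf ['.'] ('.' :: t) = true := by simp [List.isPrefixOf]
        simp only [hpre, if_pos, List.length_cons, List.length_nil, List.drop_succ_cons,
          List.drop_zero]
        rw [ih f [] _ (by simpa using Nat.le_of_succ_le_succ h)]
        simp only [pvSplit]
        cases hs : pvSplit t with
        | nil => exact absurd hs (pvSplit_ne_nil t)
        | cons s r => simp
      · have hpre : List.isPrefixOf ['.'] (c :: t) = false := by
          simp [List.isPrefixOf]
          exact fun hh => hc hh.symm
        simp only [hpre, Bool.false_eq_true, if_false]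
        rw [ih f (c :: cur) _ (by simpa using Nat.le_of_succ_le_succ h)]
        simp only [pvSplit, if_neg hc]
        cases hs : pvSplit t with
        | nil => exact absurd hs (pvSplit_ne_nil t)
        | cons s r => simp

theorem pvSplitOn_eq (l : List Char) : PySem.Chars.splitOn l ['.'] = pvSplit l := by
  rw [PySem.Chars.splitOn, pvSplitOn_go l (l.length + 1) [] [] (by omega)]
  cases hs : pvSplit l with
  | nil => exact absurd hs (pvSplit_ne_nil l)
  | cons s r => simp

theorem pvA_inner (code : String) (cs : List Char) (d : Int) (pc : PySem.Set String) :
    (PySem.List.enumerate cs d).foldl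
      (fun parent_codes p =>
        if p.2 = '.' ∨ p.2 = '/' then
          PySem.Set.add parent_codes (PySem.Str.slice code none (some p.1))
        else parent_codes) pc = pvP code cs d pc := by
  induction cs generalizing d pc with
  | nil => simp [PySem.List.enumerate_nil, pvP]
  | cons c t ih =>
    rw [PySem.List.enumerate_cons, List.foldl_cons]
    simp only [pvP]
    exact ih (d + 1) _

theorem pvB_inner (code : String) (cs : List Char) (d : Int) (pc : PySem.Set String) :
    ((pvSplit (cs.map pvNorm)).dropLast.foldl (pvStepB code) (pc, d)).1 = pvP code cs d pc := by
  induction cs generalizing d pc with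
  | nil => simp [pvSplit, pvP]
  | cons c t ih =>
    by_cases hc : pvNorm c = '.'
    · have hsep : c = '.' ∨ c = '/' := by
        unfold pvNorm at hc; split at hc
        · right; assumption
        · left; exact hc
      cases hs : pvSplit (t.map pvNorm) with
      | nil => exact absurd hs (pvSplit_ne_nil _)
      | cons s r =>
        have hmap : pvSplit ((c :: t).map pvNorm) = [] :: s :: r := by
          simp [pvSplit, if_pos hc, hs]
        rw [hmap, List.dropLast_cons_of_ne_nil (by simp), List.foldl_cons]
        have hstep : pvStepB code (pc, d) [] =
            (PySem.Set.add pc (PySem.Str.slice code none (some d)), d + 1) := by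
          simp [pvStepB]
        rw [hstep]
        simp only [pvP, if_pos hsep]
        have h2 := ih (d + 1) (PySem.Set.add pc (PySem.Str.slice code none (some d)))
        rw [hs] at h2
        exact h2
    · have hsep : ¬ (c = '.' ∨ c = '/') := by
        unfold pvNorm at hc
        rintro (h | h)
        · subst h; simp at hc
        · subst h; simp at hc
      cases hs : pvSplit (t.map pvNorm) with
      | nil => exact absurd hs (pvSplit_ne_nil _)
      | cons s r =>
        have hmap : pvSplit ((c :: t).map pvNorm) = (pvNorm c :: s) :: r := by
          simp [pvSplit, if_neg hc, hs]
        rw [hmap]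
        simp only [pvP, if_neg hsep]
        have h2 := ih (d + 1) pc
        rw [hs] at h2
        cases r with
        | nil => simpa using h2
        | cons x r' =>
          have e1 : pvStepB code (pc, d) (pvNorm c :: s) = pvStepB code (pc, d + 1) s := by
            simp only [pvStepB, List.length_cons, Nat.cast_add, Nat.cast_one]
            rw [show d + ((s.length : Int) + 1) = d + 1 + (s.length : Int) from by ring]
          rw [← h2]
          simp only [List.dropLast_cons₂, List.foldl_cons, e1]

theorem pv_code_eq (code : String) (pc : PySem.Set String) :
    (PySem.List.enumerate code.toList).foldl
      (fun parent_codes p =>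
        if p.2 = '.' ∨ p.2 = '/' then
          PySem.Set.add parent_codes (PySem.Str.slice code none (some p.1))
        else parent_codes) pc =
    ((PySem.List.slice (PySem.Chars.splitOn (PySem.Str.replace code "/" ".").toList ['.'])
        none (some (-1))).foldl
        (fun (st : PySem.Set String × Int) seg =>
          let n := st.2 + (seg.length : Int)
          (PySem.Set.add st.1 (PySem.Str.slice code none (some n)), n + 1))
        (pc, 0)).1 := by
  rw [pvReplace_eq, pvSplitOn_eq, PySem.List.slice_to_neg_one]
  rw [pvA_inner code code.toList 0 pc]
  exact (pvB_inner code code.toList 0 pc).symm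

-- ===== VERDICT helper =====
theorem pv_fold_eq (xs : List (List (String × String))) (pc : PySem.Set String) :
    xs.foldl
      (fun parent_codes item =>
        let code := PySem.Dict.getD ⟨item⟩ "account_code" ""
        (PySem.List.enumerate code.toList).foldl
          (fun parent_codes p =>
            if p.2 = '.' ∨ p.2 = '/' then
              PySem.Set.add parent_codes (PySem.Str.slice code none (some p.1))
            else parent_codes)
          parent_codes) pc =
    xs.foldl
      (fun parent_codes item =>
        let code := PySem.Dict.getD ⟨item⟩ "account_code" ""
        let segs := PySem.Chars.splitOn (PySem.Str.replace code "/" ".").toList ['.']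
        ((PySem.List.slice segs none (some (-1))).foldl
          (fun (st : PySem.Set String × Int) seg =>
            let n := st.2 + (seg.length : Int)
            (PySem.Set.add st.1 (PySem.Str.slice code none (some n)), n + 1))
          (parent_codes, 0)).1) pc := by
  induction xs generalizing pc with
  | nil => simp only [List.foldl_nil]
  | cons x xs ih =>
    simp only [List.foldl_cons]
    rw [pv_code_eq]
    exact ih _

-- ===== VERDICT (by name: the statement is the Claim_ definition above) =====
theorem build_parent_codes_py_spec : Claim_equal_build_parent_codes_py := by
  intro tb_items _
  unfold Spec_build_parent_codes_py build_parent_codes_py build_parent_codes_py_alt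
  exact pv_fold_eq tb_items PySem.Set.empty
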